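-- pv_equiv track=rewrite | github.com/fukurome/DKA | Automaton_operations.py | parse_input_automat
-- ===== SOURCE A (Python) =====
-- def parse_input_automat(input_string):
--     # Реализация остается прежней
--     parsed_data = {}
--
--     # Разбиваем входную строку по запятой, предполагая, что каждая пара имеет формат "1.a=2"
--     pairs = input_string.split(', ')
--
--     for pair in pairs:
--         # Разбиваем пару на составляющие (1.a=2 => ['1.a', '2'])
--         components = pair.split('=')
--         if len(components) == 2:
--             key, value = components
--             # Разбиваем ключ на составляющие (1.a => ['1', 'a'])
--             key_components = key.split('.')
--             if len(key_components) == 2: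
--                 parsed_data[(key_components[0], key_components[1])] = value
--
--     return parsed_data
-- ===== SOURCE B (Python) =====
-- def _parse_pair(pair):
--     # single left-to-right scan of the pair: part1 '.' part2 '=' value
--     i, n = 0, len(pair)
--     start = i
--     while i < n and pair[i] != '.' and pair[i] != '=':
--         i += 1
--     if i >= n or pair[i] != '.':
--         return None
--     part1 = pair[start:i]
--     i += 1
--     start = i
--     while i < n and pair[i] != '.' and pair[i] != '=':
--         i += 1
--     if i >= n or pair[i] != '=':
--         return None
--     part2 = pair[start:i]
--     value = pair[i + 1:]
--     if '=' in value:
--         return None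
--     return (part1, part2, value)
--
--
-- def parse_input_automat(input_string):
--     parsed_data = {}
--     for pair in input_string.split(', '):
--         parsed = _parse_pair(pair)
--         if parsed is not None:
--             part1, part2, value = parsed
--             parsed_data[(part1, part2)] = value
--     return parsed_data
-- ===== Notes on version B (the rewrite author's own statement) =====
-- stated objective: alternative
-- what changed: Replaced the per-pair two-stage split-and-validate cascade (split on the equals sign, length check, split the key on the dot, length check) with a single left-to-right state-machine scan that parses part1, dot, part2, equals sign, value in one pass.
import Mathlib
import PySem

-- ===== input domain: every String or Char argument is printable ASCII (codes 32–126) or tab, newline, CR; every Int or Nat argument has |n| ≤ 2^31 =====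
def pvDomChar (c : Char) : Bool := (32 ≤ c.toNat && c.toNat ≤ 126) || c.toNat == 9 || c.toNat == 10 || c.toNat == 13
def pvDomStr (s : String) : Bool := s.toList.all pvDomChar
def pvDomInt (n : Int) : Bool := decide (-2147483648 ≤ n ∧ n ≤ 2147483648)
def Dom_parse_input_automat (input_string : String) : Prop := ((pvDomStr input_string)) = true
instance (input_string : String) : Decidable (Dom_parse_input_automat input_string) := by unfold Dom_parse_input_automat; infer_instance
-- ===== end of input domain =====

-- B replaces A's two-stage split-and-validate cascade per pair by a single left-to-right scan
-- (alternative decomposition, same asymptotic cost). A's dict of ((k1,k2) ↦ v) is returned as the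
-- list of (k1, k2, v) triples in insertion order with last-write-wins, per the type convention.

-- ===== PORT A =====
-- dict[(k1,k2)] = v is kept as a PySem.Dict keyed by the pair; strings are handled as char lists
-- (PySem.Chars.splitOn = Python's split with a non-empty separator, exact).
def parse_input_automat (input_string : String) : List (String × String × String) :=
  ((PySem.Chars.splitOn input_string.toList [',', ' ']).foldl
    (fun d pair =>
      match PySem.Chars.splitOn pair ['='] with
      | [key, value] =>
        match PySem.Chars.splitOn key ['.'] with
        | [k0, k1] => d.insert (String.ofList k0, String.ofList k1) (String.ofList value)
        | _ => d
      | _ => d)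
    PySem.Dict.empty).items.map (fun p => (p.1.1, p.1.2, p.2))

-- ===== PORT B =====
-- the while-loop of Source B's _parse_pair: longest run of chars that are neither '.' nor '=', plus the rest
def pvTakeSeg : List Char → List Char × List Char
  | [] => ([], [])
  | c :: rest =>
    if c = '.' ∨ c = '=' then ([], c :: rest)
    else
      let (seg, r) := pvTakeSeg rest
      (c :: seg, r)

def pvParsePair (cs : List Char) : Option ((String × String) × String) :=
  match pvTakeSeg cs with
  | (g1, r1) =>
    match r1 with
    | [] => none
    | c1 :: r2 =>
      if c1 = '.' then
        match pvTakeSeg r2 with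
        | (g2, r3) =>
          match r3 with
          | [] => none
          | c2 :: v =>
            if c2 = '=' then
              if v.contains '=' then none
              else some ((String.ofList g1, String.ofList g2), String.ofList v)
            else none
      else none

def parse_input_automat_alt (input_string : String) : List (String × String × String) :=
  ((PySem.Chars.splitOn input_string.toList [',', ' ']).foldl
    (fun d cs =>
      match pvParsePair cs with
      | some (k, v) => d.insert k v
      | none => d)
    PySem.Dict.empty).items.map (fun p => (p.1.1, p.1.2, p.2))

-- ===== PRECONDITION & SPEC =====
def Spec_parse_input_automat (input_string : String) (out : List (String × String × String)) : Prop := out = parse_input_automat_alt input_string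
instance (input_string : String) (out : List (String × String × String)) : Decidable (Spec_parse_input_automat input_string out) := by unfold Spec_parse_input_automat; infer_instance

-- ===== CLAIM (what is proved, stated in full; the proofs are below) =====
def Claim_equal_parse_input_automat : Prop := ∀ (input_string : String), Dom_parse_input_automat input_string → Spec_parse_input_automat input_string (parse_input_automat input_string)

-- ===== LEMMAS AND PROOFS =====

-- natural one-char split, used to characterise PySem.Chars.splitOn cs [c]
def pvSplitC (c : Char) : List Char → List (List Char)
  | [] => [[]]
  | x :: rest =>
    if x = c then [] :: pvSplitC c rest
    else (x :: (pvSplitC c rest).headI) :: (pvSplitC c rest).tail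

theorem pvSplitC_ne_nil (c : Char) (cs : List Char) : pvSplitC c cs ≠ [] := by
  cases cs with
  | nil => simp [pvSplitC]
  | cons x rest => simp only [pvSplitC]; split <;> simp

theorem pvSplitC_headI_tail (c : Char) (cs : List Char) :
    (pvSplitC c cs).headI :: (pvSplitC c cs).tail = pvSplitC c cs := by
  cases h : pvSplitC c cs with
  | nil => exact absurd h (pvSplitC_ne_nil c cs)
  | cons a t => simp

theorem pv_go_eq (c : Char) : ∀ (fuel : Nat) (l cur : List Char) (acc : List (List Char)),
    l.length ≤ fuel →
    PySem.Chars.splitOn.go [c] fuel l cur acc =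
      acc.reverse ++ (cur.reverse ++ (pvSplitC c l).headI) :: (pvSplitC c l).tail := by
  intro fuel
  induction fuel with
  | zero =>
    intro l cur acc hl
    have hnil : l = [] := by cases l <;> simp_all
    subst hnil
    rw [PySem.Chars.splitOn.go.eq_def]
    simp [pvSplitC]
  | succ n ih =>
    intro l cur acc hl
    cases l with
    | nil =>
      rw [PySem.Chars.splitOn.go.eq_def]
      simp [pvSplitC]
    | cons x rest =>
      rw [PySem.Chars.splitOn.go.eq_def]
      simp only [List.length_cons, Nat.succ_le_succ_iff] at hl
      by_cases hx : x = c
      · have hpre : [c].isPrefixOf (x :: rest) = true := by simp [List.isPrefixOf, hx]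
        simp only [hpre, if_pos rfl, List.length_singleton, List.drop_succ_cons, List.drop_zero]
        rw [ih rest [] (cur.reverse :: acc) hl]
        simp only [pvSplitC, hx, if_pos rfl]
        rw [← pvSplitC_headI_tail c rest]
        simp
      · have hpre : [c].isPrefixOf (x :: rest) = false := by simp [List.isPrefixOf]; exact fun h => hx h.symm
        simp only [hpre, Bool.false_eq_true, if_false]
        rw [ih rest (x :: cur) acc hl]
        simp only [pvSplitC, hx, if_neg hx]
        simp

theorem pvSplitOn_eq (c : Char) (cs : List Char) :
    PySem.Chars.splitOn cs [c] = pvSplitC c cs := by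
  unfold PySem.Chars.splitOn
  rw [pv_go_eq c (cs.length + 1) cs [] [] (by omega)]
  simpa using pvSplitC_headI_tail c cs

theorem pvLength_splitC (c : Char) (cs : List Char) :
    (pvSplitC c cs).length = cs.count c + 1 := by
  induction cs with
  | nil => simp [pvSplitC]
  | cons x rest ih =>
    simp only [pvSplitC]
    by_cases h : x = c
    · simp [h, List.count_cons, ih]
    · rw [if_neg h, List.count_cons]
      cases hS : pvSplitC c rest with
      | nil => exact absurd hS (pvSplitC_ne_nil c rest)
      | cons a t =>
        rw [hS] at ih
        simp only [List.length_cons] at ih ⊢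
        have hbe : (x == c) = false := by simp [h]
        simp [hbe, ← ih]

theorem pvSplitC_of_not_mem {c : Char} {cs : List Char} (h : c ∉ cs) :
    pvSplitC c cs = [cs] := by
  induction cs with
  | nil => simp [pvSplitC]
  | cons x rest ih =>
    simp only [List.mem_cons, not_or] at h
    have hx : ¬ x = c := fun hc => h.1 hc.symm
    simp [pvSplitC, hx, ih h.2]

theorem pvSplitC_append {c : Char} {a : List Char} (b : List Char) (ha : c ∉ a) :
    pvSplitC c (a ++ c :: b) = a :: pvSplitC c b := by
  induction a with
  | nil => simp [pvSplitC]
  | cons x a ih =>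
    simp only [List.mem_cons, not_or] at ha
    have hx : ¬ x = c := fun hc => ha.1 hc.symm
    simp [pvSplitC, hx, ih ha.2]

theorem pvSplitC_singleton {c : Char} {cs v : List Char} (h : pvSplitC c cs = [v]) :
    cs = v ∧ c ∉ cs := by
  induction cs generalizing v with
  | nil => simp [pvSplitC] at h; simp [h]
  | cons x rest ih =>
    simp only [pvSplitC] at h
    by_cases hx : x = c
    · rw [if_pos hx] at h
      cases hS : pvSplitC c rest with
      | nil => exact absurd hS (pvSplitC_ne_nil c rest)
      | cons a t => rw [hS] at h; simp at h
    · rw [if_neg hx] at h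
      cases h' : pvSplitC c rest with
      | nil => exact absurd h' (pvSplitC_ne_nil c rest)
      | cons a t =>
        rw [h'] at h
        simp at h
        obtain ⟨h1, h2⟩ := h
        have : pvSplitC c rest = [a] := by rw [h']; simp [h2]
        obtain ⟨he, hm⟩ := ih this
        constructor
        · simp [← h1, he]
        · simp only [List.mem_cons, not_or]
          exact ⟨fun hc => hx hc.symm, hm⟩

theorem pvSplitC_pair {c : Char} {cs k v : List Char} (h : pvSplitC c cs = [k, v]) :
    cs = k ++ c :: v ∧ c ∉ k ∧ c ∉ v := by
  induction cs generalizing k v with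
  | nil => simp [pvSplitC] at h
  | cons x rest ih =>
    simp only [pvSplitC] at h
    by_cases hx : x = c
    · rw [if_pos hx] at h
      injection h with h1 h2
      subst h1
      obtain ⟨he, hm⟩ := pvSplitC_singleton h2
      exact ⟨by simp [hx, he], by simp, he ▸ hm⟩
    · rw [if_neg hx] at h
      cases h' : pvSplitC c rest with
      | nil => exact absurd h' (pvSplitC_ne_nil c rest)
      | cons a t =>
        rw [h'] at h
        simp at h
        obtain ⟨h1, h2⟩ := h
        have : pvSplitC c rest = [a, v] := by rw [h']; simp [h2]
        obtain ⟨he, hk', hv'⟩ := ih this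
        refine ⟨by simp [← h1, he], ?_, hv'⟩
        simp only [← h1, List.mem_cons, not_or]
        exact ⟨fun hc => hx hc.symm, hk'⟩

-- Source B's scanning loop computes takeWhile/dropWhile of "neither '.' nor '='"
def pvQ (c : Char) : Bool := !(c == '.' || c == '=')

theorem pvTakeSeg_eq (cs : List Char) :
    pvTakeSeg cs = (cs.takeWhile pvQ, cs.dropWhile pvQ) := by
  induction cs with
  | nil => simp [pvTakeSeg]
  | cons x rest ih =>
    by_cases h : x = '.' ∨ x = '='
    · simp [pvTakeSeg, h, List.takeWhile_cons, List.dropWhile_cons, pvQ]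
      rcases h with h | h <;> simp [h]
    · push_neg at h
      simp [pvTakeSeg, h.1, h.2, ih, List.takeWhile_cons, pvQ]

theorem pv_prefix_of_eqfree {c : Char} {a b k v : List Char}
    (h : a ++ b = k ++ c :: v) (ha : c ∉ a) (hk : c ∉ k) : a <+: k := by
  have h1 : a <+: k ++ c :: v := h ▸ List.prefix_append a b
  have h2 : k <+: k ++ c :: v := List.prefix_append k (c :: v)
  rcases List.prefix_or_prefix_of_prefix h1 h2 with h3 | h3
  · exact h3
  · obtain ⟨t, ht⟩ := h3
    cases t with
    | nil => simp only [List.append_nil] at ht; exact ht ▸ List.prefix_refl a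
    | cons y t' =>
      exfalso
      apply ha
      have h' : k ++ (y :: (t' ++ b)) = k ++ c :: v := by
        rw [← ht] at h
        simpa [List.append_assoc] using h
      have h2 := List.append_cancel_left h'
      simp only [List.cons.injEq] at h2
      rw [← ht]
      simp [h2.1]

-- A's per-pair extraction, as a function of the pair alone
def pvPairA (cs : List Char) : Option ((String × String) × String) :=
  match PySem.Chars.splitOn cs ['='] with
  | [key, value] =>
    match PySem.Chars.splitOn key ['.'] with
    | [k0, k1] => some ((String.ofList k0, String.ofList k1), String.ofList value)
    | _ => none
  | _ => none

theorem pvQ_false_iff (x : Char) : pvQ x = false ↔ (x = '.' ∨ x = '=') := by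
  simp only [pvQ, Bool.not_eq_false', Bool.or_eq_true, beq_iff_eq]

theorem pvQ_not_mem {l : List Char} (hl : ∀ x ∈ l, pvQ x = true) : '.' ∉ l ∧ '=' ∉ l := by
  constructor <;> · intro hm; have := hl _ hm; simp [pvQ] at this

theorem pv_dropWhile_head {p : Char → Bool} {l r : List Char} {x : Char}
    (h : l.dropWhile p = x :: r) : p x = false := by
  induction l with
  | nil => simp at h
  | cons y l ih =>
    rw [List.dropWhile_cons] at h
    by_cases hy : p y = true
    · exact ih (by rwa [if_pos hy] at h)
    · rw [if_neg hy] at h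
      injection h with h1 _
      subst h1
      simpa using hy

theorem pvCentral (cs : List Char) : pvPairA cs = pvParsePair cs := by
  obtain ⟨hg1d, hg1e⟩ := pvQ_not_mem (fun x hx => List.mem_takeWhile_imp hx)
      (l := cs.takeWhile pvQ)
  unfold pvParsePair
  rw [pvTakeSeg_eq]
  set g1 := cs.takeWhile pvQ with hg1def
  have hsplit : g1 ++ cs.dropWhile pvQ = cs := List.takeWhile_append_dropWhile
  cases hr1 : cs.dropWhile pvQ with
  | nil =>
    rw [hr1, List.append_nil] at hsplit
    unfold pvPairA
    have hout : PySem.Chars.splitOn cs ['='] = [cs] := by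
      rw [pvSplitOn_eq]
      conv_lhs => rw [← hsplit]
      rw [pvSplitC_of_not_mem hg1e, hsplit]
    rw [hout]
  | cons h r2 =>
    have hQh : pvQ h = false := pv_dropWhile_head hr1
    rw [hr1] at hsplit
    rcases (pvQ_false_iff h).mp hQh with hdot | heq
    · -- h = '.': B scans on into r2
      subst hdot
      dsimp only
      rw [if_pos rfl]
      obtain ⟨hg2d, hg2e⟩ := pvQ_not_mem (fun x hx => List.mem_takeWhile_imp hx)
          (l := r2.takeWhile pvQ)
      rw [pvTakeSeg_eq]
      set g2 := r2.takeWhile pvQ with hg2def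
      have hsplit2 : g2 ++ r2.dropWhile pvQ = r2 := List.takeWhile_append_dropWhile
      cases hr3 : r2.dropWhile pvQ with
      | nil =>
        rw [hr3, List.append_nil] at hsplit2
        unfold pvPairA
        have hne : '=' ∉ cs := by
          rw [← hsplit, ← hsplit2]
          simp only [List.mem_append, List.mem_cons, not_or]
          exact ⟨hg1e, by decide, hg2e⟩
        rw [pvSplitOn_eq, pvSplitC_of_not_mem hne]
      | cons h2 r4 =>
        have hQh2 : pvQ h2 = false := pv_dropWhile_head hr3
        rw [hr3] at hsplit2
        rcases (pvQ_false_iff h2).mp hQh2 with hdot2 | heq2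
        · -- a second '.' before any '=': both sides yield none
          subst hdot2
          dsimp only
          rw [if_neg (by decide)]
          unfold pvPairA
          rw [pvSplitOn_eq]
          cases hS : pvSplitC '=' cs with
          | nil => exact absurd hS (pvSplitC_ne_nil _ _)
          | cons k t =>
            cases t with
            | nil => rfl
            | cons v t' =>
              cases t' with
              | cons z t'' => rfl
              | nil =>
                obtain ⟨hcs, hke, _⟩ := pvSplitC_pair hS
                have hpre : (g1 ++ '.' :: g2 ++ ['.']) <+: k := by
                  apply pv_prefix_of_eqfree (b := r4) (v := v) ?_ ?_ hke
                  · rw [← hcs, ← hsplit, ← hsplit2]; simp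
                  · simp only [List.mem_append, List.mem_cons, not_or]
                    exact ⟨⟨hg1e, by decide, hg2e⟩, by decide⟩
                have hcount : 2 ≤ k.count '.' := by
                  have h1 := List.IsPrefix.count_le '.' hpre
                  have h2 : ((g1 ++ '.' :: g2 ++ ['.']).count '.') = 2 := by
                    simp [List.count_append,
                      List.count_eq_zero.mpr hg1d, List.count_eq_zero.mpr hg2d]
                  omega
                dsimp only
                rw [pvSplitOn_eq]
                cases hT : pvSplitC '.' k with
                | nil => exact absurd hT (pvSplitC_ne_nil _ _)
                | cons a u =>
                  cases u with
                  | nil => rfl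
                  | cons b u' =>
                    cases u' with
                    | cons w u'' => rfl
                    | nil =>
                      exfalso
                      have hlen := pvLength_splitC '.' k
                      rw [hT] at hlen
                      simp at hlen
                      omega
        · -- '=' reached after the second segment: both sides agree
          subst heq2
          dsimp only
          rw [if_pos rfl]
          have hcs : cs = (g1 ++ '.' :: g2) ++ '=' :: r4 := by
            rw [← hsplit, ← hsplit2]; simp
          have hane : '=' ∉ g1 ++ '.' :: g2 := by
            simp only [List.mem_append, List.mem_cons, not_or]
            exact ⟨hg1e, by decide, hg2e⟩
          unfold pvPairA
          have hout : PySem.Chars.splitOn cs ['='] = (g1 ++ '.' :: g2) :: pvSplitC '=' r4 := by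
            rw [pvSplitOn_eq]
            conv_lhs => rw [hcs]
            rw [pvSplitC_append r4 hane]
          rw [hout]
          by_cases hmem : '=' ∈ r4
          · rw [if_pos (by simpa using hmem)]
            cases hS : pvSplitC '=' r4 with
            | nil => exact absurd hS (pvSplitC_ne_nil _ _)
            | cons a u =>
              cases u with
              | nil => exact absurd (pvSplitC_singleton hS).2 (by simpa using hmem)
              | cons b u' => rfl
          · rw [if_neg (by simpa using hmem)]
            rw [pvSplitC_of_not_mem hmem]
            dsimp only
            rw [pvSplitOn_eq, pvSplitC_append g2 hg1d, pvSplitC_of_not_mem hg2d]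
    · -- stop char is '=' with no '.' before it: both sides yield none
      subst heq
      dsimp only
      rw [if_neg (by decide)]
      unfold pvPairA
      have hout : PySem.Chars.splitOn cs ['='] = g1 :: pvSplitC '=' r2 := by
        rw [pvSplitOn_eq]
        conv_lhs => rw [← hsplit]
        rw [pvSplitC_append r2 hg1e]
      rw [hout]
      cases hS : pvSplitC '=' r2 with
      | nil => exact absurd hS (pvSplitC_ne_nil _ _)
      | cons v t =>
        cases t with
        | nil =>
          dsimp only
          rw [pvSplitOn_eq, pvSplitC_of_not_mem hg1d]
        | cons w t' => rfl

theorem pvStep_eq (d : PySem.Dict (String × String) String) (cs : List Char) :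
    (match PySem.Chars.splitOn cs ['='] with
      | [key, value] =>
        match PySem.Chars.splitOn key ['.'] with
        | [k0, k1] => d.insert (String.ofList k0, String.ofList k1) (String.ofList value)
        | _ => d
      | _ => d) =
    (match pvParsePair cs with
      | some (k, v) => d.insert k v
      | none => d) := by
  rw [← pvCentral]
  unfold pvPairA
  cases PySem.Chars.splitOn cs ['='] with
  | nil => rfl
  | cons a t =>
    cases t with
    | nil => rfl
    | cons b t' =>
      cases t' with
      | cons z t'' => rfl
      | nil =>
        dsimp only
        cases PySem.Chars.splitOn a ['.'] with
        | nil => rfl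
        | cons x u =>
          cases u with
          | nil => rfl
          | cons y u' => cases u' <;> rfl

-- ===== VERDICT (by name: the statement is the Claim_ definition above) =====
theorem parse_input_automat_spec : Claim_equal_parse_input_automat := by
  intro s _
  unfold Spec_parse_input_automat parse_input_automat parse_input_automat_alt
  congr 1
  congr 1
  congr 1
  funext d cs
  exact pvStep_eq d cs
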